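-- pv_equiv track=rewrite | github.com/BoudewijnKlijn/competitive_programming | d2/d2_part1.py | contains_double_or_triple
-- ===== SOURCE A (Python) =====
-- from collections import Counter
--
-- def contains_double_or_triple(strings):
--     number_of_doubles, number_of_triples = 0, 0
--     for line_item in strings.split():
--         if Counter(Counter(line_item).values()).get(2):
--             number_of_doubles += 1
--         if Counter(Counter(line_item).values()).get(3):
--             number_of_triples += 1
--     return number_of_doubles, number_of_triples
-- ===== SOURCE B (Python) =====
-- def contains_double_or_triple(strings):
--     doubles, triples = 0, 0
--     for word in strings.split():
--         has2 = has3 = False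
--         prev = None
--         run = 0
--         for ch in sorted(word):
--             if ch == prev:
--                 run += 1
--             else:
--                 if run == 2:
--                     has2 = True
--                 if run == 3:
--                     has3 = True
--                 prev, run = ch, 1
--         if run == 2:
--             has2 = True
--         if run == 3:
--             has3 = True
--         if has2:
--             doubles += 1
--         if has3:
--             triples += 1
--     return doubles, triples
-- ===== Notes on version B (the rewrite author's own statement) =====
-- stated objective: alternative
-- what changed: Replaces the Counter-of-Counter hash-table construction per word (A builds two Counters twice, once for the double test and once for the triple test) by sorting the word's characters once and scanning consecutive equal-character runs, flagging a run of length exactly 2 or 3.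
import Mathlib
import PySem

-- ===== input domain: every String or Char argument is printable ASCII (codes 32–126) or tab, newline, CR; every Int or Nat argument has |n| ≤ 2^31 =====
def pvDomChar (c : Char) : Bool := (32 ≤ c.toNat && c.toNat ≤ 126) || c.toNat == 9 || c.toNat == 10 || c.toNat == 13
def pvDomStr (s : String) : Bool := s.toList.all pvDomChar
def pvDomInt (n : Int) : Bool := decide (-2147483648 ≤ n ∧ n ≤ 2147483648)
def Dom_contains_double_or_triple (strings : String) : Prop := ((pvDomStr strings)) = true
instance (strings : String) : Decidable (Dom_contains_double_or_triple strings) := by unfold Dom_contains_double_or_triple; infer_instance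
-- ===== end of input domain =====

-- B replaces A's Counter-of-Counter hash tables per word by sorting the word's
-- characters and scanning consecutive equal-character runs (objective: alternative).

-- ===== PORT A =====
-- truthiness of `Counter(...).get(k)`: None and 0 are falsy
def pyTruthyOptInt : Option Int → Bool
  | some v => v != 0
  | none => false

def contains_double_or_triple (strings : String) : Int × Int :=
  (PySem.Str.split₀ strings).foldl
    (fun (acc : Int × Int) line_item =>
      let acc1 :=
        if pyTruthyOptInt ((PySem.Dict.counter (PySem.Dict.counter line_item.toList).values).get? 2)
        then (acc.1 + 1, acc.2) else acc
      if pyTruthyOptInt ((PySem.Dict.counter (PySem.Dict.counter line_item.toList).values).get? 3)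
      then (acc1.1, acc1.2 + 1) else acc1)
    (0, 0)

-- ===== PORT B =====
-- run scan over the sorted character list: `prev`, `run`, and the two flags
def runScan : List Char → Option Char → Int → Bool → Bool → Bool × Bool
  | [], _, run, h2, h3 => (h2 || run == 2, h3 || run == 3)
  | c :: rest, prev, run, h2, h3 =>
      if some c == prev then runScan rest prev (run + 1) h2 h3
      else runScan rest (some c) 1 (h2 || run == 2) (h3 || run == 3)

def contains_double_or_triple_alt (strings : String) : Int × Int :=
  (PySem.Str.split₀ strings).foldl
    (fun (acc : Int × Int) word =>
      let flags := runScan (PySem.List.sorted word.toList (fun x => x) false) none 0 false false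
      ((if flags.1 then acc.1 + 1 else acc.1), (if flags.2 then acc.2 + 1 else acc.2)))
    (0, 0)

-- ===== PRECONDITION & SPEC =====
def Spec_contains_double_or_triple (strings : String) (out : Int × Int) : Prop := out = contains_double_or_triple_alt strings
instance (strings : String) (out : Int × Int) : Decidable (Spec_contains_double_or_triple strings out) := by unfold Spec_contains_double_or_triple; infer_instance

-- ===== CLAIM (what is proved, stated in full; the proofs are below) =====
def Claim_equal_contains_double_or_triple : Prop := ∀ (strings : String), Dom_contains_double_or_triple strings → Spec_contains_double_or_triple strings (contains_double_or_triple strings)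

-- ===== LEMMAS AND PROOFS =====

-- A's per-word test: Counter(vs).get(k) is truthy iff k occurs in vs
lemma truthy_counter_get (vs : List Int) (k : Int) :
    pyTruthyOptInt ((PySem.Dict.counter vs).get? k) = decide (k ∈ vs) := by
  by_cases h : k ∈ vs
  · have hk : k ∈ (PySem.Dict.counter vs).keys := by
      rw [PySem.Dict.keys_counter, PySem.Set.mem_ofList]; exact h
    have hne : (PySem.Dict.counter vs).get? k ≠ none := by
      rw [Ne, PySem.Dict.get?_eq_none_iff_not_mem_keys]; simpa using hk
    obtain ⟨v, hv⟩ := Option.ne_none_iff_exists'.mp hne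
    have hg : (PySem.Dict.counter vs).getD k 0 = (vs.count k : Int) :=
      PySem.Dict.getD_counter vs k
    rw [PySem.Dict.getD_eq_get?_getD, hv] at hg
    simp only [Option.getD_some] at hg
    have hpos : 0 < vs.count k := List.count_pos_iff.mpr h
    have hv0 : v ≠ 0 := by rw [hg]; exact_mod_cast hpos.ne'
    simp [hv, pyTruthyOptInt, hv0, h]
  · have h0 : (PySem.Dict.counter vs).get? k = none := by
      rw [PySem.Dict.get?_eq_none_iff_not_mem_keys, PySem.Dict.keys_counter, PySem.Set.mem_ofList]
      exact h
    simp [h0, pyTruthyOptInt, h]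

lemma mem_values_counter (l : List Char) (k : Int) :
    k ∈ (PySem.Dict.counter l).values ↔ ∃ c ∈ l, (l.count c : Int) = k := by
  rw [PySem.Dict.values_eq_map_keys _ (PySem.Dict.nodup_keys_counter l) 0]
  simp only [List.mem_map, PySem.Dict.keys_counter, PySem.Set.mem_ofList,
    PySem.Dict.getD_counter]

def cntP (prev : Option Char) (xs : List Char) : Int :=
  match prev with | none => 0 | some p => (xs.count p : Int)

-- B's run scan on a sorted list, closed form
lemma runScan_spec (xs : List Char) (prev : Option Char) (run : Int) (h2 h3 : Bool)
    (hs : xs.Pairwise (· ≤ ·))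
    (hge : ∀ p, prev = some p → ∀ x ∈ xs, p ≤ x) :
    runScan xs prev run h2 h3 =
      ((h2 || decide (run + cntP prev xs = 2 ∨ ∃ c ∈ xs, prev ≠ some c ∧ (xs.count c : Int) = 2)),
       (h3 || decide (run + cntP prev xs = 3 ∨ ∃ c ∈ xs, prev ≠ some c ∧ (xs.count c : Int) = 3))) := by
  induction xs generalizing prev run h2 h3 with
  | nil =>
      simp [runScan, cntP]
      cases prev <;> simp [beq_eq_decide]
  | cons c rest ih =>
      have hrest : rest.Pairwise (· ≤ ·) := hs.of_cons
      have hcle : ∀ x ∈ rest, c ≤ x := fun x hx => List.rel_of_pairwise_cons hs hx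
      by_cases hpc : prev = some c
      · subst hpc
        rw [runScan]
        simp only [beq_self_eq_true, if_pos]
        rw [ih (some c) (run + 1) h2 h3 hrest
          (by intro p hp x hx; cases hp; exact hcle x hx)]
        have key : ∀ n : Int,
            ((run + 1) + cntP (some c) rest = n ∨ ∃ c' ∈ rest, some c ≠ some c' ∧ (rest.count c' : Int) = n)
            ↔ (run + cntP (some c) (c :: rest) = n ∨ ∃ c' ∈ c :: rest, some c ≠ some c' ∧ ((c :: rest).count c' : Int) = n) := by
          intro n
          have hcnt : cntP (some c) (c :: rest) = cntP (some c) rest + 1 := by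
            simp only [cntP, List.count_cons_self]; push_cast; ring
          constructor
          · rintro (h | ⟨c', hc', hne, hcnt'⟩)
            · left; rw [hcnt]; omega
            · have hnec : c ≠ c' := fun h => hne (by rw [h])
              exact Or.inr ⟨c', List.mem_cons_of_mem _ hc', hne, by
                rwa [List.count_cons_of_ne hnec]⟩
          · rintro (h | ⟨c', hc', hne, hcnt'⟩)
            · left; rw [hcnt] at h; omega
            · have hnec : c ≠ c' := fun h => hne (by rw [h])
              rcases List.mem_cons.mp hc' with rfl | hc'
              · exact absurd rfl hnec
              · exact Or.inr ⟨c', hc', hne, by rwa [List.count_cons_of_ne hnec] at hcnt'⟩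
        rw [decide_eq_decide.mpr (key 2), decide_eq_decide.mpr (key 3)]
      · rw [runScan]
        have hbeq : (some c == prev) = false := by
          cases prev with
          | none => rfl
          | some p => simp; exact fun h => hpc (by rw [h])
        rw [hbeq]
        simp only [Bool.false_eq_true, if_false]
        rw [ih (some c) 1 _ _ hrest
          (by intro p hp x hx; cases hp; exact hcle x hx)]
        have hzero : cntP prev (c :: rest) = 0 := by
          cases prev with
          | none => rfl
          | some p =>
            have hple : ∀ x ∈ c :: rest, p ≤ x := hge p rfl
            have hpc' : p < c := lt_of_le_of_ne (hple c (List.mem_cons_self)) (fun h => hpc (by rw [h]))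
            have hnm : p ∉ c :: rest := by
              intro hm
              rcases List.mem_cons.mp hm with rfl | hm
              · exact absurd rfl hpc'.ne
              · exact absurd (hcle p hm) (not_le.mpr hpc')
            simp [cntP, List.count_eq_zero.mpr hnm]
        have key : ∀ n : Int,
            (1 + cntP (some c) rest = n ∨ ∃ c' ∈ rest, some c ≠ some c' ∧ (rest.count c' : Int) = n)
            ↔ (∃ c' ∈ c :: rest, prev ≠ some c' ∧ ((c :: rest).count c' : Int) = n) := by
          intro n
          have hprevne : ∀ x ∈ c :: rest, prev ≠ some x := by
            intro x hx h
            cases prev with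
            | none => simp at h
            | some p =>
              have hple := hge p rfl
              have hpc' : p < c := lt_of_le_of_ne (hple c (List.mem_cons_self)) (fun hh => hpc (by rw [hh]))
              have hcx : c ≤ x := by
                rcases List.mem_cons.mp hx with rfl | hx
                · exact le_refl _
                · exact hcle x hx
              have hpx : p = x := by injection h
              have hlt := hpc'.trans_le hcx
              rw [← hpx] at hlt
              exact lt_irrefl _ hlt
          constructor
          · rintro (h | ⟨c', hc', hne, hcnt'⟩)
            · refine ⟨c, List.mem_cons_self, hprevne c List.mem_cons_self, ?_⟩
              simp only [cntP] at h
              rw [List.count_cons_self]; push_cast; omega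
            · have hnec : c ≠ c' := fun h => hne (by rw [h])
              refine ⟨c', List.mem_cons_of_mem _ hc', hprevne c' (List.mem_cons_of_mem _ hc'), ?_⟩
              rwa [List.count_cons_of_ne hnec]
          · rintro ⟨c', hc', hne, hcnt'⟩
            by_cases hec : c' = c
            · subst hec
              left
              rw [List.count_cons_self] at hcnt'
              simp only [cntP]; push_cast at hcnt' ⊢; omega
            · rcases List.mem_cons.mp hc' with rfl | hc'
              · exact absurd rfl hec
              · refine Or.inr ⟨c', hc', (fun h => hec (by injection h with h'; exact h'.symm)), ?_⟩
                rwa [List.count_cons_of_ne (fun h => hec h.symm)] at hcnt'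
        rw [hzero]
        rw [decide_eq_decide.mpr (key 2), decide_eq_decide.mpr (key 3)]
        have hrun2 : (run == (2:Int)) = decide (run + 0 = 2) := by simp [beq_eq_decide]
        have hrun3 : (run == (3:Int)) = decide (run + 0 = 3) := by simp [beq_eq_decide]
        rw [hrun2, hrun3]
        simp only [Bool.decide_or, Bool.or_assoc]
        all_goals infer_instance

-- both per-word tests decide "some character occurs exactly k times"
lemma word_flag_A (w : String) (k : Int) :
    pyTruthyOptInt ((PySem.Dict.counter (PySem.Dict.counter w.toList).values).get? k)
      = decide (∃ c ∈ w.toList, (w.toList.count c : Int) = k) := by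
  rw [truthy_counter_get]
  exact decide_eq_decide.mpr (mem_values_counter w.toList k)

lemma word_flag_B (w : String) (k : Int) (hk : k ≠ 0) :
    (decide ((0:Int) + cntP none (PySem.List.sorted w.toList (fun x => x) false) = k ∨
       ∃ c ∈ PySem.List.sorted w.toList (fun x => x) false, (none : Option Char) ≠ some c ∧
         ((PySem.List.sorted w.toList (fun x => x) false).count c : Int) = k))
      = decide (∃ c ∈ w.toList, (w.toList.count c : Int) = k) := by
  have hperm : (PySem.List.sorted w.toList (fun x => x) false).Perm w.toList :=
    PySem.List.sorted_perm _ _ _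
  apply decide_eq_decide.mpr
  constructor
  · rintro (h | ⟨c, hc, _, hcnt⟩)
    · exfalso; apply hk; simpa [cntP] using h.symm
    · exact ⟨c, hperm.mem_iff.mp hc, by rwa [hperm.count_eq] at hcnt⟩
  · rintro ⟨c, hc, hcnt⟩
    exact Or.inr ⟨c, hperm.mem_iff.mpr hc, by simp, by rwa [hperm.count_eq]⟩

-- ===== VERDICT (by name: the statement is the Claim_ definition above) =====
theorem contains_double_or_triple_spec : Claim_equal_contains_double_or_triple := by
  intro strings _
  unfold Spec_contains_double_or_triple contains_double_or_triple contains_double_or_triple_alt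
  congr 1
  funext acc w
  have hB : runScan (PySem.List.sorted w.toList (fun x => x) false) none 0 false false
      = (decide (∃ c ∈ w.toList, (w.toList.count c : Int) = 2),
         decide (∃ c ∈ w.toList, (w.toList.count c : Int) = 3)) := by
    rw [runScan_spec _ none 0 false false
      (PySem.List.sorted_pairwise w.toList (fun x => x))
      (fun p hp => nomatch hp)]
    rw [word_flag_B w 2 (by norm_num), word_flag_B w 3 (by norm_num)]
    simp
  simp only [hB, word_flag_A]
  by_cases h2 : ∃ c ∈ w.toList, (w.toList.count c : Int) = 2 <;>
    by_cases h3 : ∃ c ∈ w.toList, (w.toList.count c : Int) = 3 <;>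
      simp [h2, h3]
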